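-- pv_equiv track=rewrite | github.com/bhosalems/SpamFilter_NaiveBayes_Association | NaiveBayes.py | mails_in_ham_spam
-- ===== SOURCE A (Python) =====
-- def mails_in_ham_spam(train_set):
--     spam_count = 0
--     ham_count = 0
--     for (words, label) in train_set:
--         if (label == 'spam'):
--             spam_count += 1
--         else:
--             ham_count += 1
--     return ham_count, spam_count
-- ===== SOURCE B (Python) =====
-- def mails_in_ham_spam(train_set):
--     # Divide and conquer: split in half, count each half recursively, combine.
--     n = len(train_set)
--     if n == 0:
--         return 0, 0
--     if n == 1:
--         return (0, 1) if train_set[0][1] == 'spam' else (1, 0)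
--     mid = n // 2
--     h1, s1 = mails_in_ham_spam(train_set[:mid])
--     h2, s2 = mails_in_ham_spam(train_set[mid:])
--     return h1 + h2, s1 + s2
-- ===== Notes on version B (the rewrite author's own statement) =====
-- stated objective: alternative
-- what changed: Replaces the iterative two-counter loop with a divide-and-conquer recursion: split the list in half, count each half recursively, and add the (ham, spam) pairs.
import Mathlib
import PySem

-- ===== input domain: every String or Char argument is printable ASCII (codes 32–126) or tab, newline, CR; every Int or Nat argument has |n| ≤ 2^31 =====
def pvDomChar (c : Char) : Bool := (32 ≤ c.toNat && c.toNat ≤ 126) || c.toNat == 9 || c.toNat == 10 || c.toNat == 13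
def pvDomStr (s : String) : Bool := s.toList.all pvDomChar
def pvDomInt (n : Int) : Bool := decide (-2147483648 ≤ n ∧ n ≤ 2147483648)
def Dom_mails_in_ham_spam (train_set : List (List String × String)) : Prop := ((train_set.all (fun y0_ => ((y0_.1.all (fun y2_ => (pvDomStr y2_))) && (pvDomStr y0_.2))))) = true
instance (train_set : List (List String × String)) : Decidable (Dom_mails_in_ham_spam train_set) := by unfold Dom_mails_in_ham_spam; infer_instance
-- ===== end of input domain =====

-- B replaces the loop with a divide-and-conquer recursion (alternative decomposition; equality of results proved below).

-- ===== PORT A =====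
-- literal port of A: one loop maintaining (spam_count, ham_count)
def mails_in_ham_spam (train_set : List (List String × String)) : Int × Int :=
  let st := train_set.foldl
    (fun (acc : Int × Int) (p : List String × String) =>
      if p.2 = "spam" then (acc.1 + 1, acc.2) else (acc.1, acc.2 + 1))
    (0, 0)
  (st.2, st.1)

-- ===== PORT B =====
-- port of Source B: split in half, recurse on both halves, add the pairs
def mails_in_ham_spam_alt (train_set : List (List String × String)) : Int × Int :=
  if _h0 : train_set.length = 0 then (0, 0)
  else if _h1 : train_set.length = 1 then
    if (train_set.headD ([], "")).2 = "spam" then (0, 1) else (1, 0)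
  else
    let mid := train_set.length / 2
    let l := mails_in_ham_spam_alt (train_set.take mid)
    let r := mails_in_ham_spam_alt (train_set.drop mid)
    (l.1 + r.1, l.2 + r.2)
termination_by train_set.length
decreasing_by
  · simp only [List.length_take]; omega
  · simp only [List.length_drop]; omega

-- ===== PRECONDITION & SPEC =====
def Spec_mails_in_ham_spam (train_set : List (List String × String)) (out : Int × Int) : Prop := out = mails_in_ham_spam_alt train_set
instance (train_set : List (List String × String)) (out : Int × Int) : Decidable (Spec_mails_in_ham_spam train_set out) := by unfold Spec_mails_in_ham_spam; infer_instance

-- ===== CLAIM (what is proved, stated in full; the proofs are below) =====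
def Claim_equal_mails_in_ham_spam : Prop := ∀ (train_set : List (List String × String)), Dom_mails_in_ham_spam train_set → Spec_mails_in_ham_spam train_set (mails_in_ham_spam train_set)

-- ===== LEMMAS AND PROOFS =====
-- A's fold computes (spam, ham) = (countP spam, len - countP spam) from any start state
theorem pv_fold_counts (ts : List (List String × String)) (s h : Int) :
    ts.foldl
      (fun (acc : Int × Int) (p : List String × String) =>
        if p.2 = "spam" then (acc.1 + 1, acc.2) else (acc.1, acc.2 + 1))
      (s, h)
    = (s + (ts.countP (fun p => p.2 = "spam") : Nat),
       h + ((ts.length : Int) - (ts.countP (fun p => p.2 = "spam") : Nat))) := by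
  induction ts generalizing s h with
  | nil => simp
  | cons x xs ih =>
    simp only [List.foldl_cons, List.countP_cons, List.length_cons]
    by_cases hx : x.2 = "spam" <;> simp only [hx, if_true, if_false,
      decide_true, decide_false] <;> rw [ih] <;>
      refine Prod.ext ?_ ?_ <;> simp <;> push_cast <;> ring

-- B's divide-and-conquer computes (len - countP spam, countP spam)
theorem pv_alt_counts (ts : List (List String × String)) :
    mails_in_ham_spam_alt ts
    = ((ts.length : Int) - (ts.countP (fun p => p.2 = "spam") : Nat),
       ((ts.countP (fun p => p.2 = "spam") : Nat) : Int)) := by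
  induction ts using mails_in_ham_spam_alt.induct with
  | case1 ts h0 =>
    rw [mails_in_ham_spam_alt]
    rw [List.length_eq_zero_iff] at h0
    simp [h0]
  | case2 ts h0 h1 hx =>
    rw [mails_in_ham_spam_alt]
    match ts, h1 with
    | [x], _ => simp_all
  | case3 ts h0 h1 hx =>
    rw [mails_in_ham_spam_alt]
    match ts, h1 with
    | [x], _ => simp_all
  | case4 ts h0 h1 mid ihl ihr =>
    rw [mails_in_ham_spam_alt, dif_neg h0, dif_neg h1]
    have hm : mid = ts.length / 2 := rfl
    rw [hm] at ihl ihr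
    dsimp only
    rw [ihl, ihr]
    have hsplit := List.take_append_drop (ts.length / 2) ts
    have hc : ts.countP (fun p => p.2 = "spam")
        = (ts.take (ts.length / 2)).countP (fun p => p.2 = "spam")
          + (ts.drop (ts.length / 2)).countP (fun p => p.2 = "spam") := by
      conv_lhs => rw [← hsplit]
      rw [List.countP_append]
    have hl : ts.length = (ts.take (ts.length / 2)).length + (ts.drop (ts.length / 2)).length := by
      rw [List.length_take, List.length_drop]; omega
    refine Prod.ext ?_ ?_ <;> simp only [hc] <;> push_cast <;> omega

-- ===== VERDICT (by name: the statement is the Claim_ definition above) =====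
theorem mails_in_ham_spam_spec : Claim_equal_mails_in_ham_spam := by
  intro ts _
  unfold Spec_mails_in_ham_spam mails_in_ham_spam
  rw [pv_fold_counts, pv_alt_counts]
  refine Prod.ext ?_ ?_ <;> simp
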